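-- pv_equiv track=rewrite | github.com/AlexVelickyi/sql-project-postgres | run_qa.py | split_sql_statements
-- ===== SOURCE A (Python) =====
-- def split_sql_statements(sql_text: str) -> list[str]:
--     statements: list[str] = []
--     buffer: list[str] = []
--     in_single_quote = False
--     in_line_comment = False
--     in_block_comment = False
--
--     i = 0
--     while i < len(sql_text):
--         ch = sql_text[i]
--         nxt = sql_text[i + 1] if i + 1 < len(sql_text) else ""
--
--         if in_line_comment:
--             buffer.append(ch)
--             if ch == "\n":
--                 in_line_comment = False
--             i += 1
--             continue
--
--         if in_block_comment:
--             buffer.append(ch)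
--             if ch == "*" and nxt == "/":
--                 buffer.append(nxt)
--                 i += 2
--                 in_block_comment = False
--                 continue
--             i += 1
--             continue
--
--         if not in_single_quote and ch == "-" and nxt == "-":
--             buffer.append(ch)
--             buffer.append(nxt)
--             i += 2
--             in_line_comment = True
--             continue
--
--         if not in_single_quote and ch == "/" and nxt == "*":
--             buffer.append(ch)
--             buffer.append(nxt)
--             i += 2
--             in_block_comment = True
--             continue
--
--         if ch == "'":
--             buffer.append(ch)
--             # Handle escaped quote: ''
--             if in_single_quote and nxt == "'":
--                 buffer.append(nxt)
--                 i += 2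
--                 continue
--             in_single_quote = not in_single_quote
--             i += 1
--             continue
--
--         if ch == ";" and not in_single_quote:
--             statement = "".join(buffer).strip()
--             if statement:
--                 statements.append(statement)
--             buffer = []
--             i += 1
--             continue
--
--         buffer.append(ch)
--         i += 1
--
--     tail = "".join(buffer).strip()
--     if tail:
--         statements.append(tail)
--     return statements
-- ===== SOURCE B (Python) =====
-- def split_sql_statements(sql_text: str) -> list[str]:
--     statements: list[str] = []
--     buffer: list[str] = []
--     i = 0
--     n = len(sql_text)
--     while i < n:
--         # normal state: jump to the earliest of --, /*, ', ;
--         hits = [(k, tok) for tok in ("--", "/*", "'", ";")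
--                 if (k := sql_text.find(tok, i)) != -1]
--         if not hits:
--             buffer.append(sql_text[i:])
--             break
--         k, tok = min(hits)
--         buffer.append(sql_text[i:k])
--         if tok == "--":
--             e = sql_text.find("\n", k + 2)
--             buffer.append(sql_text[k:] if e == -1 else sql_text[k:e + 1])
--             i = n if e == -1 else e + 1
--         elif tok == "/*":
--             e = sql_text.find("*/", k + 2)
--             buffer.append(sql_text[k:] if e == -1 else sql_text[k:e + 2])
--             i = n if e == -1 else e + 2
--         elif tok == "'":
--             j = k + 1
--             while True:
--                 e = sql_text.find("'", j)
--                 if e == -1: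
--                     buffer.append(sql_text[k:])
--                     i = n
--                     break
--                 if sql_text[e + 1:e + 2] == "'":   # '' escape: keep scanning
--                     j = e + 2
--                     continue
--                 buffer.append(sql_text[k:e + 1])
--                 i = e + 1
--                 break
--         else:  # ";" flushes a statement
--             statement = "".join(buffer).strip()
--             if statement:
--                 statements.append(statement)
--             buffer = []
--             i = k + 1
--     tail = "".join(buffer).strip()
--     if tail:
--         statements.append(tail)
--     return statements
-- ===== Notes on version B (the rewrite author's own statement) =====
-- stated objective: alternative
-- what changed: A walks the text one character at a time through a five-flag state machine; B is a slice-and-jump scanner that uses str.find to locate the next token of interest (--, /*, ', ;) and consumes whole comment/string/plain chunks at once.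
import Mathlib
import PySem

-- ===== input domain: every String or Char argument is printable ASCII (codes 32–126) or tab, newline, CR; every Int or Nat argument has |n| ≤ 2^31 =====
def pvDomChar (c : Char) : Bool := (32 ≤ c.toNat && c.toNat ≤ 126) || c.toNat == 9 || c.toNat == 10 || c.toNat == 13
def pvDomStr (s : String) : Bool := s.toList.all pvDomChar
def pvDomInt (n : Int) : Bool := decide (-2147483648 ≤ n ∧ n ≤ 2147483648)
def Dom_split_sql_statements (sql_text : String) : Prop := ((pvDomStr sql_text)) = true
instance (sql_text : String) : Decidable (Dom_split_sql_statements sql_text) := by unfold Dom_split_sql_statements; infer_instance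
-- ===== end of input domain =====

-- B replaces A's per-character state machine by a slice-and-jump scanner (find the next
-- token of interest, consume whole comment/string/plain chunks at once): objective 'alternative'.

-- ===== PORT A =====
def emitA (buf : List Char) (stmts : List String) : List String :=
  let st := PySem.Str.strip (String.mk buf)
  if st ≠ "" then stmts ++ [st] else stmts

def loopA : List Char → List Char → Bool → Bool → Bool → List String → List String
  | [], buf, _, _, _, stmts => emitA buf stmts
  | ch :: rest, buf, sq, lc, bc, stmts =>
    if lc then
      loopA rest (buf ++ [ch]) sq (if ch == '\n' then false else lc) bc stmts
    else if bc then
      if ch == '*' && rest.head? == some '/' then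
        loopA rest.tail (buf ++ [ch, '/']) sq lc false stmts
      else
        loopA rest (buf ++ [ch]) sq lc bc stmts
    else if !sq && ch == '-' && rest.head? == some '-' then
      loopA rest.tail (buf ++ [ch, '-']) sq true bc stmts
    else if !sq && ch == '/' && rest.head? == some '*' then
      loopA rest.tail (buf ++ [ch, '*']) sq lc true stmts
    else if ch == '\'' then
      if sq && rest.head? == some '\'' then
        loopA rest.tail (buf ++ [ch, '\'']) sq lc bc stmts
      else
        loopA rest (buf ++ [ch]) (!sq) lc bc stmts
    else if ch == ';' && !sq then
      loopA rest [] sq lc bc (emitA buf stmts)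
    else
      loopA rest (buf ++ [ch]) sq lc bc stmts
  termination_by l => l.length
  decreasing_by all_goals (simp [List.length_tail]; try omega)

def split_sql_statements (sql_text : String) : List String :=
  loopA sql_text.toList [] false false false []

-- ===== PORT B =====
inductive PvTok | dash | slash | quote | semi
  deriving DecidableEq, Repr

-- earliest occurrence of one of "--", "/*", "'", ";"  (port of the min-of-finds in Source B)
def findStop : List Char → Option (List Char × PvTok × List Char)
  | [] => none
  | c :: r =>
    if c = '-' ∧ r.head? = some '-' then some ([], .dash, r.tail)
    else if c = '/' ∧ r.head? = some '*' then some ([], .slash, r.tail)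
    else if c = '\'' then some ([], .quote, r)
    else if c = ';' then some ([], .semi, r)
    else
      match findStop r with
      | none => none
      | some (p, t, r') => some (c :: p, t, r')

-- chunk up to and including the next '\n' (sql_text.find("\n", …) in Source B)
def findLine : List Char → List Char × List Char
  | [] => ([], [])
  | c :: r =>
    if c = '\n' then (['\n'], r)
    else let (p, r') := findLine r; (c :: p, r')

-- chunk up to and including the next "*/" (sql_text.find("*/", …) in Source B)
def findBlockEnd : List Char → List Char × List Char
  | [] => ([], [])
  | c :: r =>
    if c = '*' ∧ r.head? = some '/' then (['*', '/'], r.tail)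
    else let (p, r') := findBlockEnd r; (c :: p, r')

-- chunk up to and including the closing quote, skipping '' escapes (the inner find loop in Source B)
def findStrEnd : List Char → List Char × List Char
  | [] => ([], [])
  | c :: r =>
    if c = '\'' then
      if r.head? = some '\'' then
        let (p, r') := findStrEnd r.tail; ('\'' :: '\'' :: p, r')
      else (['\''], r)
    else let (p, r') := findStrEnd r; (c :: p, r')
  termination_by l => l.length
  decreasing_by all_goals (simp [List.length_tail]; try omega)

def emitB (buf : List Char) (stmts : List String) : List String :=
  let st := PySem.Str.strip (String.mk buf)
  if st ≠ "" then stmts ++ [st] else stmts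

theorem findStop_length : ∀ (l : List Char) {p t r}, findStop l = some (p, t, r) → r.length < l.length := by
  intro l
  induction l with
  | nil => intro p t r h; simp [findStop] at h
  | cons c cs ih =>
    intro p t r h
    simp only [findStop] at h
    split_ifs at h with h1 h2 h3 h4
    · obtain ⟨-, -, rfl⟩ := Option.some.inj h
      simp [List.length_tail]
    · obtain ⟨-, -, rfl⟩ := Option.some.inj h
      simp [List.length_tail]
    · obtain ⟨-, -, rfl⟩ := Option.some.inj h
      simp
    · obtain ⟨-, -, rfl⟩ := Option.some.inj h
      simp
    · cases hcs : findStop cs with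
      | none => rw [hcs] at h; simp at h
      | some v =>
        obtain ⟨p0, t0, r0⟩ := v
        rw [hcs] at h
        obtain ⟨-, -, rfl⟩ := Option.some.inj h
        have := ih hcs
        simp; omega

theorem findLine_length (l : List Char) : (findLine l).2.length ≤ l.length := by
  fun_induction findLine l <;> simp_all <;> omega

theorem findBlockEnd_length (l : List Char) : (findBlockEnd l).2.length ≤ l.length := by
  fun_induction findBlockEnd l <;> simp_all [List.length_tail] <;> omega

theorem findStrEnd_length (l : List Char) : (findStrEnd l).2.length ≤ l.length := by
  fun_induction findStrEnd l <;> simp_all [List.length_tail] <;> omega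

def loopB (l : List Char) (buf : List Char) (stmts : List String) : List String :=
  match h : findStop l with
  | none => emitB (buf ++ l) stmts
  | some (p, t, r) =>
    match t with
    | .dash =>
        match hq : findLine r with
        | (q, r') => loopB r' (buf ++ p ++ '-' :: '-' :: q) stmts
    | .slash =>
        match hq : findBlockEnd r with
        | (q, r') => loopB r' (buf ++ p ++ '/' :: '*' :: q) stmts
    | .quote =>
        match hq : findStrEnd r with
        | (q, r') => loopB r' (buf ++ p ++ '\'' :: q) stmts
    | .semi =>
        loopB r [] (emitB (buf ++ p) stmts)
  termination_by l.length
  decreasing_by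
  · have h1 := findStop_length _ h
    have h2 := findLine_length r
    rw [hq] at h2; simp at h2 ⊢; omega
  · have h1 := findStop_length _ h
    have h2 := findBlockEnd_length r
    rw [hq] at h2; simp at h2 ⊢; omega
  · have h1 := findStop_length _ h
    have h2 := findStrEnd_length r
    rw [hq] at h2; simp at h2 ⊢; omega
  · exact findStop_length _ h

def split_sql_statements_alt (sql_text : String) : List String :=
  loopB sql_text.toList [] []

-- ===== PRECONDITION & SPEC =====
def Spec_split_sql_statements (sql_text : String) (out : List String) : Prop := out = split_sql_statements_alt sql_text
instance (sql_text : String) (out : List String) : Decidable (Spec_split_sql_statements sql_text out) := by unfold Spec_split_sql_statements; infer_instance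

-- ===== CLAIM (what is proved, stated in full; the proofs are below) =====
def Claim_equal_split_sql_statements : Prop := ∀ (sql_text : String), Dom_split_sql_statements sql_text → Spec_split_sql_statements sql_text (split_sql_statements sql_text)

-- ===== LEMMAS AND PROOFS =====

theorem emitA_eq_emitB (buf : List Char) (stmts : List String) : emitA buf stmts = emitB buf stmts := rfl

-- A in line-comment state consumes exactly the findLine chunk
theorem loopA_line (l : List Char) : ∀ buf stmts,
    loopA l buf false true false stmts
      = loopA (findLine l).2 (buf ++ (findLine l).1) false false false stmts := by
  fun_induction findLine l <;> intro buf stmts <;>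
    simp_all [loopA]

-- A in block-comment state consumes exactly the findBlockEnd chunk
theorem loopA_block (l : List Char) : ∀ buf stmts,
    loopA l buf false false true stmts
      = loopA (findBlockEnd l).2 (buf ++ (findBlockEnd l).1) false false false stmts := by
  fun_induction findBlockEnd l <;> intro buf stmts <;>
    simp_all [loopA]

-- A in single-quote state consumes exactly the findStrEnd chunk
theorem loopA_str (l : List Char) : ∀ buf stmts,
    loopA l buf true false false stmts
      = loopA (findStrEnd l).2 (buf ++ (findStrEnd l).1) false false false stmts := by
  fun_induction findStrEnd l <;> intro buf stmts <;>
    simp_all [loopA]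

-- A in normal state up to the first stop token
theorem loopA_stop (l : List Char) : ∀ buf stmts,
    loopA l buf false false false stmts =
      match findStop l with
      | none => emitA (buf ++ l) stmts
      | some (p, .dash, r) => loopA r (buf ++ p ++ ['-', '-']) false true false stmts
      | some (p, .slash, r) => loopA r (buf ++ p ++ ['/', '*']) false false true stmts
      | some (p, .quote, r) => loopA r (buf ++ p ++ ['\'']) true false false stmts
      | some (p, .semi, r) => loopA r [] false false false (emitA (buf ++ p) stmts) := by
  fun_induction findStop l <;> intro buf stmts <;>
    simp_all [loopA]
  case case6 c r h1 h2 h3 h4 hx ih =>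
    rw [if_neg (fun hh => h1 hh.1 hh.2), if_neg (fun hh => h2 hh.1 hh.2)]
  case case7 c r p t r' h1 h2 h3 h4 hx ih =>
    rw [if_neg (fun hh => h1 hh.1 hh.2), if_neg (fun hh => h2 hh.1 hh.2)]
    cases t <;> simp

theorem loopA_eq_loopB (l buf : List Char) (stmts : List String) :
    loopA l buf false false false stmts = loopB l buf stmts := by
  fun_induction loopB l buf stmts with
  | case1 l buf stmts h =>
      rw [loopA_stop, h]; simp [emitA_eq_emitB]
  | case2 l buf stmts p r h1 q r' hq h ih =>
      rw [loopA_stop, h]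
      show loopA r (buf ++ p ++ ['-', '-']) false true false stmts = _
      rw [loopA_line r, hq]
      simpa [List.append_assoc] using ih
  | case3 l buf stmts p r h1 q r' hq h ih =>
      rw [loopA_stop, h]
      show loopA r (buf ++ p ++ ['/', '*']) false false true stmts = _
      rw [loopA_block r, hq]
      simpa [List.append_assoc] using ih
  | case4 l buf stmts p r h1 q r' hq h ih =>
      rw [loopA_stop, h]
      show loopA r (buf ++ p ++ ['\'']) true false false stmts = _
      rw [loopA_str r, hq]
      simpa [List.append_assoc] using ih
  | case5 l buf stmts p r h1 h ih =>
      rw [loopA_stop, h]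
      show loopA r [] false false false (emitA (buf ++ p) stmts) = _
      simpa [emitA_eq_emitB] using ih

-- ===== VERDICT (by name: the statement is the Claim_ definition above) =====
theorem split_sql_statements_spec : Claim_equal_split_sql_statements := by
  intro s _
  unfold Spec_split_sql_statements split_sql_statements split_sql_statements_alt
  exact loopA_eq_loopB _ _ _
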